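-- pv_equiv track=rewrite | github.com/sankyousa/Flutter-circuit-analysis | Backend/app.py | _split_edges
-- ===== SOURCE A (Python) =====
-- def _split_edges(edges):
--     Rs, Ls, Cs, wires, mosfets, diodes = [], [], [], [], [], []
--     for e in edges:
--         t = e.get('type')
--         if t == 'resistor': Rs.append(e)
--         elif t == 'inductor': Ls.append(e)
--         elif t == 'capacitor': Cs.append(e)
--         elif t == 'none': wires.append(e)
--         elif t == 'mosfet': mosfets.append(e)
--         elif t == 'diode': diodes.append(e)
--     return Rs, Ls, Cs, wires, mosfets, diodes
-- ===== SOURCE B (Python) =====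
-- def _split_edges(edges):
--     Rs = [e for e in edges if e.get('type') == 'resistor']
--     Ls = [e for e in edges if e.get('type') == 'inductor']
--     Cs = [e for e in edges if e.get('type') == 'capacitor']
--     wires = [e for e in edges if e.get('type') == 'none']
--     mosfets = [e for e in edges if e.get('type') == 'mosfet']
--     diodes = [e for e in edges if e.get('type') == 'diode']
--     return Rs, Ls, Cs, wires, mosfets, diodes
-- ===== Notes on version B (the rewrite author's own statement) =====
-- stated objective: simpler
-- what changed: Replaces the single branching accumulator loop with six independent list comprehensions, one filtering scan per component type, returned in the same order.
import Mathlib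
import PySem

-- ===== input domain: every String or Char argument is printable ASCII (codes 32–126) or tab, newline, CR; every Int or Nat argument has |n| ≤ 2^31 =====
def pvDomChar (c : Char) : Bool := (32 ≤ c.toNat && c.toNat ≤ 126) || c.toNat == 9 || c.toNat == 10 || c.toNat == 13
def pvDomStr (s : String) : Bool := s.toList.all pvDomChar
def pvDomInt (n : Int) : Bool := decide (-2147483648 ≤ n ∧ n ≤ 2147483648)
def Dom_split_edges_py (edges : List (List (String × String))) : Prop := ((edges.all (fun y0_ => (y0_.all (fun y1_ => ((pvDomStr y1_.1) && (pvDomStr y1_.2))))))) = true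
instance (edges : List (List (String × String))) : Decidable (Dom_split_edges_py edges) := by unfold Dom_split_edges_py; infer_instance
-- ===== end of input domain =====

-- ===== PORT A =====
-- Header: B splits the edge list with six independent per-type filtering passes instead of one branching loop; objective: simpler decomposition.
-- shared dict primitive: e.get('type') on an association list (first match)
def pvGetType (e : List (String × String)) : Option String :=
  (e.find? (fun p => p.1 == "type")).map (·.2)

def pvLoopA : List (List (String × String)) → ((List (List (String × String))) × (List (List (String × String))) × (List (List (String × String))) × (List (List (String × String))) × (List (List (String × String))) × (List (List (String × String)))) → ((List (List (String × String))) × (List (List (String × String))) × (List (List (String × String))) × (List (List (String × String))) × (List (List (String × String))) × (List (List (String × String))))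
  | [], acc => acc
  | e :: rest, (rs, ls, cs, ws, ms, ds) =>
    let t := pvGetType e
    if t == some "resistor" then pvLoopA rest (rs ++ [e], ls, cs, ws, ms, ds)
    else if t == some "inductor" then pvLoopA rest (rs, ls ++ [e], cs, ws, ms, ds)
    else if t == some "capacitor" then pvLoopA rest (rs, ls, cs ++ [e], ws, ms, ds)
    else if t == some "none" then pvLoopA rest (rs, ls, cs, ws ++ [e], ms, ds)
    else if t == some "mosfet" then pvLoopA rest (rs, ls, cs, ws, ms ++ [e], ds)
    else if t == some "diode" then pvLoopA rest (rs, ls, cs, ws, ms, ds ++ [e])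
    else pvLoopA rest (rs, ls, cs, ws, ms, ds)

def split_edges_py (edges : List (List (String × String))) : (List (List (String × String))) × (List (List (String × String))) × (List (List (String × String))) × (List (List (String × String))) × (List (List (String × String))) × (List (List (String × String))) :=
  pvLoopA edges ([], [], [], [], [], [])

-- ===== PORT B =====
def split_edges_py_alt (edges : List (List (String × String))) : (List (List (String × String))) × (List (List (String × String))) × (List (List (String × String))) × (List (List (String × String))) × (List (List (String × String))) × (List (List (String × String))) :=
  (edges.filter (fun e => pvGetType e == some "resistor"),
   edges.filter (fun e => pvGetType e == some "inductor"),
   edges.filter (fun e => pvGetType e == some "capacitor"),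
   edges.filter (fun e => pvGetType e == some "none"),
   edges.filter (fun e => pvGetType e == some "mosfet"),
   edges.filter (fun e => pvGetType e == some "diode"))

-- ===== PRECONDITION & SPEC =====
def Spec_split_edges_py (edges : List (List (String × String))) (out : (List (List (String × String))) × (List (List (String × String))) × (List (List (String × String))) × (List (List (String × String))) × (List (List (String × String))) × (List (List (String × String)))) : Prop := out = split_edges_py_alt edges
instance (edges : List (List (String × String))) (out : (List (List (String × String))) × (List (List (String × String))) × (List (List (String × String))) × (List (List (String × String))) × (List (List (String × String))) × (List (List (String × String)))) : Decidable (Spec_split_edges_py edges out) := by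
  unfold Spec_split_edges_py
  letI d2 : DecidableEq (List (List (String × String)) × List (List (String × String))) := instDecidableEqProd
  letI d3 : DecidableEq (List (List (String × String)) × List (List (String × String)) × List (List (String × String))) := instDecidableEqProd
  letI d4 : DecidableEq (List (List (String × String)) × List (List (String × String)) × List (List (String × String)) × List (List (String × String))) := instDecidableEqProd
  letI d5 : DecidableEq (List (List (String × String)) × List (List (String × String)) × List (List (String × String)) × List (List (String × String)) × List (List (String × String))) := instDecidableEqProd
  letI d6 : DecidableEq (List (List (String × String)) × List (List (String × String)) × List (List (String × String)) × List (List (String × String)) × List (List (String × String)) × List (List (String × String))) := instDecidableEqProd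
  exact d6 out _

-- ===== CLAIM (what is proved, stated in full; the proofs are below) =====
def Claim_equal_split_edges_py : Prop := ∀ (edges : List (List (String × String))), Dom_split_edges_py edges → Spec_split_edges_py edges (split_edges_py edges)

-- ===== LEMMAS AND PROOFS =====
lemma pvLoopA_eq (edges : List (List (String × String))) (rs ls cs ws ms ds : List (List (String × String))) :
    pvLoopA edges (rs, ls, cs, ws, ms, ds) =
      (rs ++ edges.filter (fun e => pvGetType e == some "resistor"),
       ls ++ edges.filter (fun e => pvGetType e == some "inductor"),
       cs ++ edges.filter (fun e => pvGetType e == some "capacitor"),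
       ws ++ edges.filter (fun e => pvGetType e == some "none"),
       ms ++ edges.filter (fun e => pvGetType e == some "mosfet"),
       ds ++ edges.filter (fun e => pvGetType e == some "diode")) := by
  induction edges generalizing rs ls cs ws ms ds with
  | nil => simp [pvLoopA]
  | cons e rest ih =>
    simp only [pvLoopA]
    split_ifs with h1 h2 h3 h4 h5 h6 <;>
      simp_all

-- ===== VERDICT (by name: the statement is the Claim_ definition above) =====
theorem split_edges_py_spec : Claim_equal_split_edges_py := by
  intro edges _
  unfold Spec_split_edges_py split_edges_py split_edges_py_alt
  simp [pvLoopA_eq]
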